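-- pv_equiv track=rewrite | github.com/ryan-gang/Competitive-Programming | Leetcode/Solving_Questions_With_Brainpower.py | mostPointsDP
-- ===== SOURCE A (Python) =====
-- def mostPointsDP(questions: list[list[int]]) -> int:
--     """
--     For any given index `idx`, we can either solve the question or skip it.
--     If we choose to solve it, our total score will be the score we get from
--     this question, and the score from all other questions from idx + q[1]
--     +1. If we choose to skip its just from idx + 1. As we can see dp[i] is
--     the optimal points we get for questions i to n-1. And dp[i+1] is the
--     optimal points we get for questions i+1 to n-1. Which is 1 question
--     less. Or in short, dp[i] includes the question range for dp[i+1]. Also,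
--     in our dp formula, we need the later values for calculation of earlier
--     indices, so we start from the back, and make our way to the front.
--     """
--     n = len(questions)
--     dp = [0] * n
--
--     for i in range(n - 1, -1, -1):  # Start from end.
--         q = questions[i]
--         solve, skip = q[0], 0  # Solve or skip current question
--         if i + q[1] + 1 < n:  # If solved, next available question index
--             solve += dp[i + q[1] + 1]
--         if i + 1 < n:  # If skipped, next available q index
--             skip += dp[i + 1]
--
--         dp[i] = max(solve, skip)  # max of both scenarios.
--
--     return dp[0]
-- ===== SOURCE B (Python) =====
-- def mostPointsDP(questions: list[list[int]]) -> int: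
--     # Forward relaxation DP: dp[i] = best score accumulated upon ARRIVING at
--     # question i; push each state forward to i+1 (skip) and to the clamped
--     # solve target min(i + brainpower + 1, n) (solve); answer is dp[n].
--     n = len(questions)
--     dp = [0] * (n + 1)
--     for i in range(n):
--         cur = dp[i]
--         if cur > dp[i + 1]:  # skip question i
--             dp[i + 1] = cur
--         j = min(i + questions[i][1] + 1, n)
--         gain = cur + questions[i][0]  # solve question i
--         if gain > dp[j]:
--             dp[j] = gain
--     return dp[n]
-- ===== Notes on version B (the rewrite author's own statement) =====
-- stated objective: alternative
-- what changed: Replaces A's backward suffix DP (dp[i] = best for questions i..n-1, filled from the end) by a forward relaxation DP over arrival positions (dp[i] = best score on arriving at question i, pushed to i+1 for skipping and to the clamped target min(i+brainpower+1, n) for solving), reversing the traversal direction and changing the table's meaning.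
-- outside the precondition, e.g. on mostPointsDP([[5, -1]]): A returns 5, B returns 0
import Mathlib
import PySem

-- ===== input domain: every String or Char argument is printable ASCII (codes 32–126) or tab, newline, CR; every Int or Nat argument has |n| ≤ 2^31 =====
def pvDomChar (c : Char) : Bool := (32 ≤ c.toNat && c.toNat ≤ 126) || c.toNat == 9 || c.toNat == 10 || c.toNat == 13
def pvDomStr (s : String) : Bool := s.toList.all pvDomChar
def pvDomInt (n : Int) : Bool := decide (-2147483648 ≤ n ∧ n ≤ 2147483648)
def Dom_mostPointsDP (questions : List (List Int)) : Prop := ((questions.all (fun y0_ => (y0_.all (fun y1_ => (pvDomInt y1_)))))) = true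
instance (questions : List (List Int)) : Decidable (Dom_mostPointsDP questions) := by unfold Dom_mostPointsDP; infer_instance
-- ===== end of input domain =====

-- B replaces A's backward suffix DP by a forward relaxation DP over arrival positions
-- (different table meaning and traversal direction); same cost, objective: alternative.

-- ===== PORT A =====
-- Loop body of A's `for i in range(n - 1, -1, -1)` (reads/writes are exact Python
-- indexing via pyGetD/pySetD; all indices are in range under Pre_).
def stepA (questions : List (List Int)) (n : Int) (dp : List Int) (i : Int) : List Int :=
  let q := PySem.List.pyGetD questions i []
  let solve := PySem.List.pyGetD q 0 0
  let skip : Int := 0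
  let solve := if i + PySem.List.pyGetD q 1 0 + 1 < n then solve + PySem.List.pyGetD dp (i + PySem.List.pyGetD q 1 0 + 1) 0 else solve
  let skip := if i + 1 < n then skip + PySem.List.pyGetD dp (i + 1) 0 else skip
  PySem.List.pySetD dp i (max solve skip)

def mostPointsDP (questions : List (List Int)) : Int :=
  let n : Int := PySem.List.len questions
  let dp : List Int := List.replicate n.toNat 0   -- [0] * n  (exact: n = len ≥ 0)
  let dp := (PySem.List.pyRange (n - 1) (-1) (-1)).foldl (stepA questions n) dp
  PySem.List.pyGetD dp 0 0

-- ===== PORT B =====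
-- Loop body of B's `for i in range(n)`.
def stepB (questions : List (List Int)) (n : Int) (dp : List Int) (i : Int) : List Int :=
  let cur := PySem.List.pyGetD dp i 0
  let dp := if cur > PySem.List.pyGetD dp (i + 1) 0 then PySem.List.pySetD dp (i + 1) cur else dp
  let j := min (i + PySem.List.pyGetD (PySem.List.pyGetD questions i []) 1 0 + 1) n
  let gain := cur + PySem.List.pyGetD (PySem.List.pyGetD questions i []) 0 0
  if gain > PySem.List.pyGetD dp j 0 then PySem.List.pySetD dp j gain else dp

def mostPointsDP_alt (questions : List (List Int)) : Int :=
  let n : Int := PySem.List.len questions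
  let dp : List Int := List.replicate (n.toNat + 1) 0   -- [0] * (n + 1)
  let dp := (PySem.List.pyRange 0 n 1).foldl (stepB questions n) dp
  PySem.List.pyGetD dp n 0

-- ===== PRECONDITION & SPEC =====
-- Pre_ restricts to the problem's natural domain (a nonempty list of
-- [points, brainpower] records with brainpower ≥ 0): A raises IndexError on an
-- empty list and on inner lists shorter than 2; on negative brainpower both
-- programs' dp indices leave the intended range (A wraps, B clamps), a corner
-- no specification fixes and where either value is as defensible as the other.
def Pre_mostPointsDP (questions : List (List Int)) : Prop :=
  questions ≠ [] ∧ ∀ q ∈ questions, 2 ≤ q.length ∧ 0 ≤ q.getD 1 0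
instance (questions : List (List Int)) : Decidable (Pre_mostPointsDP questions) := by
  unfold Pre_mostPointsDP; infer_instance

def pvWitness_mostPointsDP : List (List Int) := [[3, 2], [4, 3], [4, 4], [2, 5]]

def Spec_mostPointsDP (questions : List (List Int)) (out : Int) : Prop := out = mostPointsDP_alt questions
instance (questions : List (List Int)) (out : Int) : Decidable (Spec_mostPointsDP questions out) := by unfold Spec_mostPointsDP; infer_instance

-- ===== CLAIM (what is proved, stated in full; the proofs are below) =====
def Claim_equal_mostPointsDP : Prop := ∀ (questions : List (List Int)), Dom_mostPointsDP questions → Pre_mostPointsDP questions → Spec_mostPointsDP questions (mostPointsDP questions)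

-- ===== LEMMAS AND PROOFS =====

-- points / brainpower of question i (proof-side views of the ports' reads)
def pvP (qs : List (List Int)) (i : Nat) : Int := (qs.getD i []).getD 0 0
def pvB (qs : List (List Int)) (i : Nat) : Int := (qs.getD i []).getD 1 0

-- the optimal score obtainable from questions i..n-1 (the meaning of A's dp[i])
def pvS (qs : List (List Int)) (i : Nat) : Int :=
  if _h : qs.length ≤ i then 0
  else max (pvP qs i + pvS qs (min (i + (pvB qs i).toNat + 1) qs.length)) (pvS qs (i + 1))
termination_by qs.length - i
decreasing_by all_goals omega

lemma pvS_of_ge (qs : List (List Int)) (i : Nat) (h : qs.length ≤ i) : pvS qs i = 0 := by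
  rw [pvS]; simp [h]

lemma pvS_eq (qs : List (List Int)) (i : Nat) (h : i < qs.length) :
    pvS qs i = max (pvP qs i + pvS qs (min (i + (pvB qs i).toNat + 1) qs.length)) (pvS qs (i + 1)) := by
  rw [pvS]; simp [Nat.not_le.mpr h]

lemma pvS_succ_le (qs : List (List Int)) (i : Nat) : pvS qs (i + 1) ≤ pvS qs i := by
  by_cases h : i < qs.length
  · rw [pvS_eq qs i h]; exact le_max_right _ _
  · rw [pvS_of_ge qs i (by omega), pvS_of_ge qs (i + 1) (by omega)]

lemma pvS_le_zero (qs : List (List Int)) (k : Nat) : pvS qs k ≤ pvS qs 0 := by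
  induction k with
  | zero => exact le_refl _
  | succ k ih => exact le_trans (pvS_succ_le qs k) ih

lemma getD_set (xs : List Int) (m k : Nat) (v d : Int) :
    (xs.set m v).getD k d = if m = k ∧ m < xs.length then v else xs.getD k d := by
  by_cases h1 : m = k
  · subst h1
    by_cases h2 : m < xs.length
    · simp [List.getD_eq_getElem?_getD, List.getElem?_set, h2]
    · simp [List.getD_eq_getElem?_getD, List.getElem?_set, h2,
        List.getElem?_eq_none (by omega : xs.length ≤ m)]
  · simp [List.getD_eq_getElem?_getD, List.getElem?_set, h1]

lemma mem_getD (qs : List (List Int)) (i : Nat) (h : i < qs.length) : qs.getD i [] ∈ qs := by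
  rw [List.getD_eq_getElem?_getD, List.getElem?_eq_getElem h]
  exact List.getElem_mem h

-- ---------- A side ----------

-- A's dp array once all indices ≥ i have been processed
def dpA (qs : List (List Int)) (i : Nat) : List Int :=
  (List.range qs.length).map (fun k => if i ≤ k then pvS qs k else 0)

lemma dpA_getD (qs : List (List Int)) (i k : Nat) :
    (dpA qs i).getD k 0 = if k < qs.length ∧ i ≤ k then pvS qs k else 0 := by
  by_cases hk : k < qs.length
  · simp [dpA, List.getD_eq_getElem?_getD, hk]
  · simp [dpA, List.getD_eq_getElem?_getD, hk,
      List.getElem?_eq_none (by simpa [dpA] using (by omega : qs.length ≤ k))]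

lemma dpA_set (qs : List (List Int)) (i : Nat) (h : i < qs.length) :
    (dpA qs (i + 1)).set i (pvS qs i) = dpA qs i := by
  apply List.ext_getElem (by simp [dpA])
  intro k hk1 hk2
  rw [List.getElem_set]
  simp only [dpA, List.getElem_map, List.getElem_range]
  split_ifs <;> simp_all <;> omega

lemma stepA_dpA (qs : List (List Int)) (hq : ∀ q ∈ qs, 2 ≤ q.length ∧ 0 ≤ q.getD 1 0)
    (i : Nat) (h : i < qs.length) :
    stepA qs (qs.length : Int) (dpA qs (i + 1)) (i : Int) = dpA qs i := by
  obtain ⟨hl2, hb0⟩ := hq _ (mem_getD qs i h)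
  set bn := ((qs.getD i []).getD 1 0).toNat with hbndef
  have hbn : (bn : Int) = (qs.getD i []).getD 1 0 := Int.toNat_of_nonneg hb0
  have hidx : (i : Int) + (qs.getD i []).getD 1 0 + 1 = ((i + bn + 1 : Nat) : Int) := by
    push_cast [hbn]; ring
  have hidx2 : (i : Int) + 1 = ((i + 1 : Nat) : Int) := by push_cast; ring
  unfold stepA
  simp only [PySem.List.pyGetD_natCast, PySem.List.pyGetD_zero, PySem.List.pyGetD_ofNat']
  rw [hidx, hidx2, PySem.List.pyGetD_natCast, PySem.List.pyGetD_natCast,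
      PySem.List.pySetD_natCast]
  rw [← dpA_set qs i h]
  congr 1
  rw [dpA_getD, dpA_getD, pvS_eq qs i h]
  simp only [pvP, pvB, ← hbndef, zero_add]
  split_ifs <;>
    first
      | (exfalso; omega)
      | rfl
      | (rw [min_eq_left (by omega), pvS_of_ge qs (i + 1) (by omega)])
      | (rw [min_eq_left (by omega)])
      | (rw [min_eq_right (by omega), pvS_of_ge qs qs.length (le_refl _), add_zero,
             pvS_of_ge qs (i + 1) (by omega)])
      | (rw [min_eq_right (by omega), pvS_of_ge qs qs.length (le_refl _), add_zero])

lemma A_fold (qs : List (List Int)) (hq : ∀ q ∈ qs, 2 ≤ q.length ∧ 0 ≤ q.getD 1 0) :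
    ∀ m : Nat, m ≤ qs.length →
      (PySem.List.pyRange ((m : Int) - 1) (-1) (-1)).foldl (stepA qs (qs.length : Int)) (dpA qs m) = dpA qs 0 := by
  intro m
  induction m with
  | zero =>
    intro _
    rw [PySem.List.pyRange_neg_one_eq_nil (by norm_num), List.foldl_nil]
  | succ m ih =>
    intro hm
    have h1 : ((m + 1 : Nat) : Int) - 1 = (m : Int) := by push_cast; ring
    rw [h1, PySem.List.pyRange_neg_one_cons (by omega)]
    rw [List.foldl_cons, stepA_dpA qs hq m (by omega)]
    exact ih (by omega)

lemma replicate_dpA (qs : List (List Int)) :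
    List.replicate qs.length (0 : Int) = dpA qs qs.length := by
  apply List.ext_getElem (by simp [dpA])
  intro k hk1 hk2
  simp only [dpA, List.getElem_replicate, List.getElem_map, List.getElem_range]
  rw [if_neg (by simp at hk1; omega)]

lemma A_val (qs : List (List Int)) (hne : qs ≠ []) (hq : ∀ q ∈ qs, 2 ≤ q.length ∧ 0 ≤ q.getD 1 0) :
    mostPointsDP qs = pvS qs 0 := by
  have hn : 0 < qs.length := List.length_pos_iff.mpr hne
  unfold mostPointsDP
  simp only [PySem.List.len_eq, Int.toNat_natCast]
  rw [replicate_dpA qs, A_fold qs hq qs.length (le_refl _), PySem.List.pyGetD_zero, dpA_getD]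
  simp [hn]

-- ---------- B side ----------

-- stepB with all Python indexing resolved to Nat-indexed list operations
def stepB' (qs : List (List Int)) (i : Nat) (dp : List Int) : List Int :=
  if dp.getD i 0 + pvP qs i >
      (if dp.getD i 0 > dp.getD (i + 1) 0 then dp.set (i + 1) (dp.getD i 0) else dp).getD
        (min (i + (pvB qs i).toNat + 1) qs.length) 0 then
    (if dp.getD i 0 > dp.getD (i + 1) 0 then dp.set (i + 1) (dp.getD i 0) else dp).set
      (min (i + (pvB qs i).toNat + 1) qs.length) (dp.getD i 0 + pvP qs i)
  else if dp.getD i 0 > dp.getD (i + 1) 0 then dp.set (i + 1) (dp.getD i 0) else dp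

lemma stepB_eq (qs : List (List Int)) (i : Nat) (hb0 : 0 ≤ pvB qs i) (dp : List Int) :
    stepB qs (qs.length : Int) dp (i : Int) = stepB' qs i dp := by
  have hb0' : 0 ≤ (qs.getD i []).getD 1 0 := hb0
  set bn := ((qs.getD i []).getD 1 0).toNat with hbndef
  have hbn : (bn : Int) = (qs.getD i []).getD 1 0 := Int.toNat_of_nonneg hb0'
  have hidx2 : (i : Int) + 1 = ((i + 1 : Nat) : Int) := by push_cast; ring
  have hj : min ((i : Int) + (qs.getD i []).getD 1 0 + 1) (qs.length : Int)
      = ((min (i + bn + 1) qs.length : Nat) : Int) := by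
    rw [Nat.cast_min]
    congr 1
    push_cast [hbn]; ring
  unfold stepB stepB'
  simp only [PySem.List.pyGetD_natCast, PySem.List.pyGetD_ofNat']
  rw [hidx2, hj]
  simp only [PySem.List.pyGetD_natCast, PySem.List.pySetD_natCast]
  have hbn2 : (pvB qs i).toNat = bn := rfl
  rw [hbn2]
  rfl

lemma stepB'_length (qs : List (List Int)) (i : Nat) (dp : List Int) :
    (stepB' qs i dp).length = dp.length := by
  unfold stepB'
  split_ifs <;> simp

-- every entry of stepB' is the old entry, or cur written at i+1, or gain written at jn
lemma stepB'_char (qs : List (List Int)) (i : Nat) (dp : List Int) (k : Nat) :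
    (stepB' qs i dp).getD k 0 = dp.getD k 0
    ∨ (k = i + 1 ∧ (stepB' qs i dp).getD k 0 = dp.getD i 0)
    ∨ (k = min (i + (pvB qs i).toNat + 1) qs.length
        ∧ (stepB' qs i dp).getD k 0 = dp.getD i 0 + pvP qs i) := by
  unfold stepB'
  split_ifs <;>
    ((try simp only [getD_set, List.length_set] at *) <;> (try split_ifs at *) <;>
      first | trivial | omega | (left; trivial) | (simp_all; omega) | simp_all)

lemma stepB'_mono (qs : List (List Int)) (i : Nat) (dp : List Int) (k : Nat) :
    dp.getD k 0 ≤ (stepB' qs i dp).getD k 0 := by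
  unfold stepB'
  split_ifs <;>
    ((try simp only [getD_set, List.length_set] at *) <;> (try split_ifs at *) <;>
      first | trivial | omega | (left; trivial) | (simp_all; omega) | simp_all)

lemma stepB'_skip (qs : List (List Int)) (i : Nat) (dp : List Int)
    (h : i + 1 < dp.length) :
    dp.getD i 0 ≤ (stepB' qs i dp).getD (i + 1) 0 := by
  unfold stepB'
  split_ifs <;>
    ((try simp only [getD_set, List.length_set] at *) <;> (try split_ifs at *) <;>
      first | trivial | omega | (left; trivial) | (simp_all; omega) | simp_all)

lemma stepB'_solve (qs : List (List Int)) (i : Nat) (dp : List Int)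
    (h : min (i + (pvB qs i).toNat + 1) qs.length < dp.length) :
    dp.getD i 0 + pvP qs i ≤ (stepB' qs i dp).getD (min (i + (pvB qs i).toNat + 1) qs.length) 0 := by
  unfold stepB'
  split_ifs <;>
    ((try simp only [getD_set, List.length_set] at *) <;> (try split_ifs at *) <;>
      first | trivial | omega | (left; trivial) | (simp_all; omega) | simp_all)

lemma stepB'_inv (qs : List (List Int)) (i : Nat) (h : i < qs.length) (dp : List Int)
    (hlen : dp.length = qs.length + 1)
    (hub : ∀ k, k ≤ qs.length → dp.getD k 0 + pvS qs k ≤ pvS qs 0)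
    (hex : ∃ k, i ≤ k ∧ k ≤ qs.length ∧ dp.getD k 0 + pvS qs k = pvS qs 0) :
    (∀ k, k ≤ qs.length → (stepB' qs i dp).getD k 0 + pvS qs k ≤ pvS qs 0)
    ∧ (∃ k, i + 1 ≤ k ∧ k ≤ qs.length ∧ (stepB' qs i dp).getD k 0 + pvS qs k = pvS qs 0) := by
  have hjn1 : i + 1 ≤ min (i + (pvB qs i).toNat + 1) qs.length := by omega
  have hjn2 : min (i + (pvB qs i).toNat + 1) qs.length ≤ qs.length := by omega
  have hSi : pvS qs i = max (pvP qs i + pvS qs (min (i + (pvB qs i).toNat + 1) qs.length)) (pvS qs (i + 1)) :=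
    pvS_eq qs i h
  have hcuri := hub i (by omega)
  have hub' : ∀ k, k ≤ qs.length → (stepB' qs i dp).getD k 0 + pvS qs k ≤ pvS qs 0 := by
    intro k hk
    rcases stepB'_char qs i dp k with hc | ⟨hk1, hc⟩ | ⟨hk1, hc⟩
    · rw [hc]; exact hub k hk
    · subst hk1; rw [hc]
      have h1 : pvS qs (i + 1) ≤ pvS qs i := pvS_succ_le qs i
      linarith
    · subst hk1; rw [hc]
      have h1 : pvP qs i + pvS qs (min (i + (pvB qs i).toNat + 1) qs.length) ≤ pvS qs i := by
        rw [hSi]; exact le_max_left _ _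
      linarith
  refine ⟨hub', ?_⟩
  obtain ⟨k0, hk0i, hk0n, hk0⟩ := hex
  by_cases hki : k0 = i
  · subst hki
    by_cases hc : pvP qs k0 + pvS qs (min (k0 + (pvB qs k0).toNat + 1) qs.length) ≤ pvS qs (k0 + 1)
    · -- skipping is optimal here: the witness moves to k0 + 1
      have hSi' : pvS qs k0 = pvS qs (k0 + 1) := by rw [hSi]; exact max_eq_right hc
      refine ⟨k0 + 1, le_refl _, by omega, le_antisymm (hub' (k0 + 1) (by omega)) ?_⟩
      have := stepB'_skip qs k0 dp (by omega)
      rw [← hSi']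
      linarith
    · -- solving is optimal here: the witness moves to jn
      have hSi' : pvS qs k0 = pvP qs k0 + pvS qs (min (k0 + (pvB qs k0).toNat + 1) qs.length) := by
        rw [hSi]; exact max_eq_left (by linarith)
      refine ⟨min (k0 + (pvB qs k0).toNat + 1) qs.length, hjn1, hjn2,
        le_antisymm (hub' _ hjn2) ?_⟩
      have := stepB'_solve qs k0 dp (by rw [hlen]; omega)
      linarith
  · refine ⟨k0, by omega, hk0n, le_antisymm (hub' k0 hk0n) ?_⟩
    have := stepB'_mono qs i dp k0
    linarith

lemma B_fold (qs : List (List Int)) (hq : ∀ q ∈ qs, 2 ≤ q.length ∧ 0 ≤ q.getD 1 0) :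
    ∀ (d i : Nat) (dp : List Int), qs.length - i = d → i ≤ qs.length → dp.length = qs.length + 1 →
      (∀ k, k ≤ qs.length → dp.getD k 0 + pvS qs k ≤ pvS qs 0) →
      (∃ k, i ≤ k ∧ k ≤ qs.length ∧ dp.getD k 0 + pvS qs k = pvS qs 0) →
      ((PySem.List.pyRange (i : Int) (qs.length : Int) 1).foldl (stepB qs (qs.length : Int)) dp).getD qs.length 0 = pvS qs 0 := by
  intro d
  induction d with
  | zero =>
    intro i dp hd hi hlen hub hex
    have hin : i = qs.length := by omega
    subst hin
    rw [PySem.List.pyRange_one_eq_nil (le_refl _), List.foldl_nil]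
    obtain ⟨k0, hk0i, hk0n, hk0⟩ := hex
    have hk0eq : k0 = qs.length := by omega
    subst hk0eq
    rw [pvS_of_ge qs qs.length (le_refl _)] at hk0
    omega
  | succ d ih =>
    intro i dp hd hi hlen hub hex
    have hilt : i < qs.length := by omega
    rw [PySem.List.pyRange_one_cons (by exact_mod_cast hilt), List.foldl_cons]
    rw [stepB_eq qs i (hq _ (mem_getD qs i hilt)).2 dp]
    obtain ⟨hub', hex'⟩ := stepB'_inv qs i hilt dp hlen hub hex
    have hcast : (i : Int) + 1 = ((i + 1 : Nat) : Int) := by push_cast; ring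
    rw [hcast]
    exact ih (i + 1) _ (by omega) (by omega) (by rw [stepB'_length]; exact hlen) hub' hex'

lemma B_val (qs : List (List Int)) (hne : qs ≠ []) (hq : ∀ q ∈ qs, 2 ≤ q.length ∧ 0 ≤ q.getD 1 0) :
    mostPointsDP_alt qs = pvS qs 0 := by
  unfold mostPointsDP_alt
  simp only [PySem.List.len_eq, Int.toNat_natCast, PySem.List.pyGetD_natCast]
  have h0 : ((0 : Nat) : Int) = (0 : Int) := rfl
  rw [← h0]
  refine B_fold qs hq qs.length 0 _ (by omega) (by omega) (by simp) ?_ ?_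
  · intro k hk
    rw [List.getD_eq_getElem?_getD, List.getElem?_replicate, if_pos (by omega : k < qs.length + 1)]
    simpa using pvS_le_zero qs k
  · exact ⟨0, le_refl _, by omega, by simp⟩

-- ===== VERDICT (by name: the statement is the Claim_ definition above) =====
theorem mostPointsDP_spec : Claim_equal_mostPointsDP := by
  intro qs _hDom hPre
  unfold Spec_mostPointsDP
  rw [A_val qs hPre.1 hPre.2, B_val qs hPre.1 hPre.2]
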